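-- pv_equiv track=rewrite | github.com/birsandiana99/UBB-Work | FP/Laboratory Assignments/Sapt 1/Assignment 1 correct/pb8.py | twin_Numbers
-- ===== SOURCE A (Python) =====
-- def prim(x):
--     '''
--     Input: x-integer number
--     Output: sem (0 if the number is not prime, 1 if the number is prime)
--     Determines if the number given is prime or not by verifying if it has any divisors other than itself
--     '''
--     sem=1
--     'special case if the value given is 1 or is a multiple of 2'
--     if x==1 or x%2==0:
--         sem=0
--     else:
--         'special case if the number is 2'
--         if x==2:
--             sem=1
--         else:
--             for i in range(3,x//2):
--                 if x%i==0:
--                     sem=0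
--         return sem
--
-- def twin_Numbers(x):
--     '''
--     Input: x- interger number
--     The subprogram prints the closest prime numbers to x, which satisfy the condition q-p=2
--     First we give p the immediate next value to x and q the value p+2 and verify if they are both prime
--     '''
--     p=x+1
--     q=p+2
--     'if they are not in the first case, we continue increasing p with 1 and q with 2 until we find the closest 2 twin prime numbers to x and print them'
--     if prim(p)==1 and prim(q)==1:
--         return p
--
--     else:
--         p=p+1
--         q=p+2
--         ok=0
--         while ok==0:
--             if prim(p)==1 and prim(q)==1:
--                 return p
--                 ok=1
--             else:
--                 p=p+1
--                 q=p+2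
-- ===== SOURCE B (Python) =====
-- def prim(x):
--     '''
--     Input: x-integer number
--     Output: sem (0 if the number is not prime, 1 if the number is prime)
--     Determines if the number given is prime or not by verifying if it has any divisors other than itself
--     '''
--     sem=1
--     'special case if the value given is 1 or is a multiple of 2'
--     if x==1 or x%2==0:
--         sem=0
--     else:
--         'special case if the number is 2'
--         if x==2:
--             sem=1
--         else:
--             for i in range(3,x//2):
--                 if x%i==0:
--                     sem=0
--         return sem
--
-- def twin_Numbers(x):
--     '''
--     Scan candidates n upward from x+1, testing one number per step with prim
--     and remembering the last n for which prim(n)==1; when the current prime's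
--     remembered predecessor is exactly 2 below it, that predecessor is the answer.
--     '''
--     prev = None
--     n = x + 1
--     while True:
--         if prim(n) == 1:
--             if prev == n - 2:
--                 return prev
--             prev = n
--         n += 1
-- ===== Notes on version B (the rewrite author's own statement) =====
-- stated objective: alternative
-- what changed: twin_Numbers now scans candidates one at a time, carrying the last value prim accepted as an accumulator and returning it when the current accepted value is exactly 2 above it, instead of A's loop that calls prim on both members of the pair (p, p+2) at every step with a separately handled first iteration.
import Mathlib
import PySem

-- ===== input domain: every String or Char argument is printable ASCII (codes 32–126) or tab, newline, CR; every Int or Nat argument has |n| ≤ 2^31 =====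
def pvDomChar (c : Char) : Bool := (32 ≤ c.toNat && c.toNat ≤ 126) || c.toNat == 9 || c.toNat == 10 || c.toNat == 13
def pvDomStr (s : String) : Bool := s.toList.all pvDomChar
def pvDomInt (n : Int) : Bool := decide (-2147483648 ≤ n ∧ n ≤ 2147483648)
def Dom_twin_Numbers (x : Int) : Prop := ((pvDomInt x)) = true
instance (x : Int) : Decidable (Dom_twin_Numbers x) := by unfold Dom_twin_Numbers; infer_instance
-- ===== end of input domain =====

-- B scans one candidate per step, carrying the last pseudo-prime seen, instead of A's
-- two prim tests per step; same return value (objective: alternative decomposition).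
-- Both while-loops are made total with a fuel bound large enough for every x in the
-- domain (the first twin pair above x lies far below the bound); the fuel guard only
-- totalises, it never changes the value reached on the domain.

-- ===== PORT A =====
-- prim returns None (here: none) on arguments taking the first branch, because
-- Python's 'return sem' sits inside the else branch only.
def prim (x : Int) : Option Int :=
  if x = 1 ∨ PySem.Int.mod x 2 = 0 then
    none
  else
    if x = 2 then some 1
    else
      some ((PySem.List.pyRange 3 (PySem.Int.floordiv x 2) 1).foldl
        (fun sem i => if PySem.Int.mod x i = 0 then 0 else sem) 1)

-- A's while-loop: test the pair (p, p+2) each step.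
def twinLoopA (p : Int) : Nat → Int
  | 0 => 0
  | f + 1 =>
    if prim p = some 1 ∧ prim (p + 2) = some 1 then p
    else twinLoopA (p + 1) f

def twin_Numbers (x : Int) : Int :=
  let p := x + 1
  let q := p + 2
  if prim p = some 1 ∧ prim q = some 1 then p
  else twinLoopA (p + 1) (4294967296 - x).toNat

-- ===== PORT B =====
-- B's while-loop: test one candidate n per step, remembering the last pseudo-prime.
def twinLoopB (n : Int) (prev : Option Int) : Nat → Int
  | 0 => 0
  | f + 1 =>
    if prim n = some 1 then
      if prev = some (n - 2) then n - 2
      else twinLoopB (n + 1) (some n) f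
    else twinLoopB (n + 1) prev f

def twin_Numbers_alt (x : Int) : Int :=
  twinLoopB (x + 1) none ((4294967296 - x).toNat + 3)

-- ===== PRECONDITION & SPEC =====
def Spec_twin_Numbers (x : Int) (out : Int) : Prop := out = twin_Numbers_alt x
instance (x : Int) (out : Int) : Decidable (Spec_twin_Numbers x out) := by unfold Spec_twin_Numbers; infer_instance

-- ===== CLAIM (what is proved, stated in full; the proofs are below) =====
def Claim_equal_twin_Numbers : Prop := ∀ (x : Int), Dom_twin_Numbers x → Spec_twin_Numbers x (twin_Numbers x)

-- ===== LEMMAS AND PROOFS =====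

-- prim never returns some 1 on the successor of a pseudo-prime (the successor is even).
theorem prim_succ_of_prim {p : Int} (h : prim p = some 1) : prim (p + 1) = none := by
  have h1 : ¬ (p = 1 ∨ PySem.Int.mod p 2 = 0) := by
    intro hc
    unfold prim at h
    rw [if_pos hc] at h
    simp at h
  have hp2 : PySem.Int.mod p 2 ≠ 0 := fun hc => h1 (Or.inr hc)
  have h2 : PySem.Int.mod (p + 1) 2 = 0 := by
    rw [PySem.Int.mod_eq_emod_of_pos (by norm_num)] at hp2 ⊢
    omega
  unfold prim
  rw [if_pos (Or.inr h2)]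

-- One-step unfolding lemmas for the two loops.
theorem stepA (p : Int) (f : Nat) :
    twinLoopA p (f + 1) =
      if prim p = some 1 ∧ prim (p + 2) = some 1 then p else twinLoopA (p + 1) f := rfl

theorem stepB (n : Int) (prev : Option Int) (f : Nat) :
    twinLoopB n prev (f + 1) =
      if prim n = some 1 then
        if prev = some (n - 2) then n - 2 else twinLoopB (n + 1) (some n) f
      else twinLoopB (n + 1) prev f := rfl

theorem stepB_ret {n : Int} {prev : Option Int} (f : Nat)
    (h : prim n = some 1) (hp : prev = some (n - 2)) :
    twinLoopB n prev (f + 1) = n - 2 := by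
  rw [stepB, if_pos h, if_pos hp]

theorem stepB_prime {n : Int} {prev : Option Int} (f : Nat)
    (h : prim n = some 1) (hp : prev ≠ some (n - 2)) :
    twinLoopB n prev (f + 1) = twinLoopB (n + 1) (some n) f := by
  rw [stepB, if_pos h, if_neg hp]

theorem stepB_skip {n : Int} {prev : Option Int} (f : Nat)
    (h : ¬ prim n = some 1) :
    twinLoopB n prev (f + 1) = twinLoopB (n + 1) prev f := by
  rw [stepB, if_neg h]

theorem some_ne_of_ne {a b : Int} (h : a ≠ b) : (some a : Option Int) ≠ some b := by
  intro hc; injection hc with hc; exact h hc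

-- prev values at least 3 behind the cursor never influence the B loop.
theorem twinLoopB_forget (f : Nat) : ∀ (n m : Int), m + 3 ≤ n →
    twinLoopB n (some m) f = twinLoopB n none f := by
  induction f with
  | zero => intro n m _; rfl
  | succ f ih =>
    intro n m hm
    by_cases hq : prim n = some 1
    · rw [stepB_prime f hq (some_ne_of_ne (by omega)),
          stepB_prime f hq (by simp)]
    · rw [stepB_skip f hq, stepB_skip f hq, ih (n + 1) m (by omega)]

-- Key correspondence: B's loop with fuel f+2 computes A's loop with fuel f.
theorem twinLoopB_eq_A (f : Nat) : ∀ (n : Int), twinLoopB n none (f + 2) = twinLoopA n f := by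
  induction f using Nat.strong_induction_on with
  | _ f ih =>
    intro n
    by_cases hq : prim n = some 1
    · -- first step: n is pseudo-prime, prev becomes some n
      have hq1 : ¬ prim (n + 1) = some 1 := by
        rw [prim_succ_of_prim hq]; simp
      have hB1 : twinLoopB n none (f + 2) = twinLoopB (n + 1) (some n) (f + 1) :=
        stepB_prime (f + 1) hq (by simp)
      have hB2 : twinLoopB (n + 1) (some n) (f + 1) = twinLoopB (n + 2) (some n) f := by
        rw [stepB_skip f hq1, show (n + 1 + 1 : Int) = n + 2 from by ring]
      by_cases hq2 : prim (n + 2) = some 1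
      · -- twin found: B returns (n+2)-2 = n, A returns n
        match f with
        | 0 =>
          rw [hB1, hB2]
          rfl
        | f + 1 =>
          have hB3 : twinLoopB (n + 2) (some n) (f + 1) = n + 2 - 2 :=
            stepB_ret f hq2 (by norm_num)
          rw [hB1, hB2, hB3, stepA, if_pos ⟨hq, hq2⟩]
          ring
      · -- n is not a twin start; both loops move on to n+3
        match f with
        | 0 =>
          rw [hB1, hB2]
          rfl
        | 1 =>
          rw [hB1, hB2, stepB_skip 0 hq2, stepA, if_neg (by intro hc; exact hq2 hc.2)]
          rfl
        | 2 =>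
          rw [hB1, hB2, stepB_skip 1 hq2, show (n + 2 + 1 : Int) = n + 3 from by ring]
          have hend : twinLoopB (n + 3) (some n) 1 = 0 := by
            by_cases h3 : prim (n + 3) = some 1
            · rw [stepB_prime 0 h3 (some_ne_of_ne (by omega))]; rfl
            · rw [stepB_skip 0 h3]; rfl
          rw [hend, stepA, if_neg (by intro hc; exact hq2 hc.2), stepA,
            if_neg (by intro hc; exact hq1 hc.1)]
          rfl
        | f + 3 =>
          have hB3 : twinLoopB (n + 2) (some n) (f + 3) = twinLoopB (n + 3) (some n) (f + 2) := by
            rw [stepB_skip (f + 2) hq2, show (n + 2 + 1 : Int) = n + 3 from by ring]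
          have hB4 : twinLoopB (n + 3) (some n) (f + 2) = twinLoopB (n + 3) none (f + 2) :=
            twinLoopB_forget (f + 2) (n + 3) n (by omega)
          have hB5 : twinLoopB (n + 3) none (f + 2) = twinLoopA (n + 3) f :=
            ih f (by omega) (n + 3)
          have hA1 : twinLoopA n (f + 3) = twinLoopA (n + 1) (f + 2) := by
            rw [stepA, if_neg (by intro hc; exact hq2 hc.2)]
          have hA2 : twinLoopA (n + 1) (f + 2) = twinLoopA (n + 2) (f + 1) := by
            rw [stepA, if_neg (by intro hc; exact hq1 hc.1),
              show (n + 1 + 1 : Int) = n + 2 from by ring]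
          have hA3 : twinLoopA (n + 2) (f + 1) = twinLoopA (n + 3) f := by
            rw [stepA, if_neg (by intro hc; exact hq2 hc.1),
              show (n + 2 + 1 : Int) = n + 3 from by ring]
          rw [hB1, hB2, hB3, hB4, hB5, hA1, hA2, hA3]
    · -- n not pseudo-prime: both loops advance by one
      have hB1 : twinLoopB n none (f + 2) = twinLoopB (n + 1) none (f + 1) :=
        stepB_skip (f + 1) hq
      match f with
      | 0 =>
        rw [hB1]
        have : twinLoopB (n + 1) none 1 = 0 := by
          by_cases h2 : prim (n + 1) = some 1
          · rw [stepB_prime 0 h2 (by simp)]; rfl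
          · rw [stepB_skip 0 h2]; rfl
        rw [this]; rfl
      | f + 1 =>
        rw [hB1, ih f (by omega) (n + 1), stepA, if_neg (by intro hc; exact hq hc.1)]

-- ===== VERDICT (by name: the statement is the Claim_ definition above) =====
theorem twin_Numbers_spec : Claim_equal_twin_Numbers := by
  intro x _
  unfold Spec_twin_Numbers twin_Numbers twin_Numbers_alt
  have h := twinLoopB_eq_A ((4294967296 - x).toNat + 1) (x + 1)
  have hf : (4294967296 - x).toNat + 1 + 2 = (4294967296 - x).toNat + 3 := by omega
  rw [hf] at h
  rw [h, stepA]
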